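-- pv_equiv track=rewrite | github.com/tomerfri12/gtm-db | scripts/import_funnel.py | _build_content_rows
-- ===== SOURCE A (Python) =====
-- from typing import Any
--
-- def _normalize_landing_url(raw: str | None) -> str:
--     if not raw:
--         return ""
--     s = raw.strip()
--     if not s:
--         return ""
--     if s.startswith("http://") or s.startswith("https://"):
--         return s
--     return "https://" + s.lstrip("/")
--
-- def _content_title_from_url(url: str) -> str:
--     slug = url.rstrip("/").split("/")[-1] or url
--     return slug.replace("-", " ").replace("_", " ").title() or "Landing page"
--
-- def _build_content_rows(
--     monday: list[dict[str, str | None]], q1: list[dict[str, str]]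
-- ) -> list[dict[str, Any]]:
--     urls: dict[str, str] = {}
--     for r in monday:
--         u = _normalize_landing_url(r.get("marketing_landing_page") or "")
--         if u:
--             urls[u] = _content_title_from_url(u)
--     for r in q1:
--         u = _normalize_landing_url(r.get("LANDING_PAGE") or "")
--         if u:
--             urls[u] = _content_title_from_url(u)
--     return [
--         {"url": u, "name": urls[u], "content_type": "landing_page", "status": "active"}
--         for u in sorted(urls.keys())
--     ]
-- ===== SOURCE B (Python) =====
-- def _normalize_landing_url(raw):
--     if not raw:
--         return ""
--     s = raw.strip()
--     if not s:
--         return ""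
--     if s.startswith("http://") or s.startswith("https://"):
--         return s
--     return "https://" + s.lstrip("/")
--
--
-- def _content_title_from_url(url):
--     slug = url.rstrip("/").split("/")[-1] or url
--     return slug.replace("-", " ").replace("_", " ").title() or "Landing page"
--
--
-- def _build_content_rows(monday, q1):
--     us = [_normalize_landing_url(r.get("marketing_landing_page") or "") for r in monday]
--     us += [_normalize_landing_url(r.get("LANDING_PAGE") or "") for r in q1]
--     us = [u for u in us if u]
--     us.sort()
--     rows = []
--     prev = None
--     for u in us:
--         if u != prev:
--             rows.append(
--                 {"url": u, "name": _content_title_from_url(u),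
--                  "content_type": "landing_page", "status": "active"}
--             )
--             prev = u
--     return rows
-- ===== Notes on version B (the rewrite author's own statement) =====
-- stated objective: alternative
-- what changed: Replaces the dict-based dedup (insert url->title into a dict, then sort its keys and look each title back up) with a flat collect of normalized urls, one sort, and a single adjacent-dedup pass that computes each title at emit time; no dict is built.
import Mathlib
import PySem

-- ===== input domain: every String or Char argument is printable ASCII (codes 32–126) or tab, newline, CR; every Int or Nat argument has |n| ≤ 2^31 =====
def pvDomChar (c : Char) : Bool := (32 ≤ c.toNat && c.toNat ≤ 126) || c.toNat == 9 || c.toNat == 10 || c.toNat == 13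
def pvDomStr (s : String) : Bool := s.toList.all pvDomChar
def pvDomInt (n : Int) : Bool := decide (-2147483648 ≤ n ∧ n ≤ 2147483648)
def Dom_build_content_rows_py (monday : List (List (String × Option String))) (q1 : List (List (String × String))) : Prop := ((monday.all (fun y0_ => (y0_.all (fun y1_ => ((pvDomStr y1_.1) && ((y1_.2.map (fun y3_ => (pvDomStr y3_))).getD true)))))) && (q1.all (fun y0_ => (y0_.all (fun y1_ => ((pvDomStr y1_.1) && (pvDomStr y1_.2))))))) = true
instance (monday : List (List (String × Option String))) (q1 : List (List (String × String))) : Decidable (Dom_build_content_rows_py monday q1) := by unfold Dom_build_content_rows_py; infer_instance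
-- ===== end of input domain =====

-- B replaces A's dict-of-titles (insert-then-sort-keys-then-look-up) by collect → sort → one
-- adjacent-dedup pass computing titles at emit time (objective: alternative, same asymptotics).

-- ===== PORT A =====
-- shared helpers: transliterations of _normalize_landing_url / _content_title_from_url
-- (both Pythons contain these helpers verbatim)

-- _normalize_landing_url; s.lstrip("/") ported as dropWhile (no PySem primitive takes strip chars)
def normURL (s : String) : String :=
  if s = "" then ""
  else
    let t := PySem.Str.strip s
    if t = "" then ""
    else if PySem.Str.startswith t "http://" || PySem.Str.startswith t "https://" then t
    else "https://" ++ String.ofList (t.toList.dropWhile (fun c => c == '/'))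

-- str.title(): an alpha char after a non-alpha char is uppercased, other alpha chars lowercased
-- (exact on ASCII, where 'cased' = alpha)
def titleChars : Bool → List Char → List Char
  | _, [] => []
  | prevAlpha, c :: rest =>
    if PySem.Chars.isalpha c then
      (if prevAlpha then PySem.Chars.lowerChar c else PySem.Chars.upperChar c) :: titleChars true rest
    else c :: titleChars false rest

-- _content_title_from_url; url.rstrip("/") ported as reverse-dropWhile-reverse;
-- split("/") is nonempty so parts[-1] never raises and the .getD [] default is dead
def titleFromURL (url : String) : String :=
  let stripped := (url.toList.reverse.dropWhile (fun c => c == '/')).reverse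
  let parts := PySem.Chars.splitOn stripped ['/']
  let slug0 := String.ofList ((PySem.List.pyGet? parts (-1)).getD [])
  let slug := if slug0 ≠ "" then slug0 else url
  let t := String.ofList (titleChars false (PySem.Str.replace (PySem.Str.replace slug "-" " ") "_" " ").toList)
  if t ≠ "" then t else "Landing page"

-- r.get(k): association-list lookup, first match; `or ""` maps missing/None/"" to ""
def getMonday (r : List (String × Option String)) : String :=
  (((r.find? (fun p => p.1 == "marketing_landing_page")).bind (fun p => p.2)).getD "")

def getQ1 (r : List (String × String)) : String :=
  (((r.find? (fun p => p.1 == "LANDING_PAGE")).map (fun p => p.2)).getD "")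

-- a row dict as an association list; urls[u] always succeeds (u ∈ keys), ported as getD ""
def rowA (d : PySem.Dict String String) (u : String) : List (String × String) :=
  [("url", u), ("name", d.getD u ""), ("content_type", "landing_page"), ("status", "active")]

def build_content_rows_py (monday : List (List (String × Option String))) (q1 : List (List (String × String))) : List (List (String × String)) :=
  let urls : PySem.Dict String String :=
    monday.foldl (fun d r =>
      let u := normURL (getMonday r)
      if u ≠ "" then d.insert u (titleFromURL u) else d) PySem.Dict.empty
  let urls2 := q1.foldl (fun d r =>
      let u := normURL (getQ1 r)
      if u ≠ "" then d.insert u (titleFromURL u) else d) urls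
  (PySem.List.sorted urls2.keys (fun x => x) false).map (fun u => rowA urls2 u)

-- ===== PORT B =====
def rowB (u : String) : List (String × String) :=
  [("url", u), ("name", titleFromURL u), ("content_type", "landing_page"), ("status", "active")]

def build_content_rows_py_alt (monday : List (List (String × Option String))) (q1 : List (List (String × String))) : List (List (String × String)) :=
  let us := (monday.map (fun r => normURL (getMonday r))
             ++ q1.map (fun r => normURL (getQ1 r))).filter (fun u => u ≠ "")
  let sortedUs := PySem.List.sorted us (fun x => x) false
  (sortedUs.foldl (fun st u =>
      if some u ≠ st.1 then (some u, st.2 ++ [rowB u]) else st)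
      ((none : Option String), ([] : List (List (String × String))))).2

-- ===== PRECONDITION & SPEC =====
def Spec_build_content_rows_py (monday : List (List (String × Option String))) (q1 : List (List (String × String))) (out : List (List (String × String))) : Prop := out = build_content_rows_py_alt monday q1
instance (monday : List (List (String × Option String))) (q1 : List (List (String × String))) (out : List (List (String × String))) : Decidable (Spec_build_content_rows_py monday q1 out) := by unfold Spec_build_content_rows_py; infer_instance

-- ===== CLAIM (what is proved, stated in full; the proofs are below) =====
def Claim_equal_build_content_rows_py : Prop := ∀ (monday : List (List (String × Option String))) (q1 : List (List (String × String))), Dom_build_content_rows_py monday q1 → Spec_build_content_rows_py monday q1 (build_content_rows_py monday q1)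

-- ===== LEMMAS AND PROOFS =====

-- ---- A's dict loop, characterized ----

-- the body of A's two dict loops, as a named function (definitionally equal to the port's lambda)
def stepA {α : Type} (f : α → String) (d : PySem.Dict String String) (r : α) : PySem.Dict String String :=
  let u := f r
  if u ≠ "" then d.insert u (titleFromURL u) else d

-- lookup after a conditional-insert loop: some (titleFromURL k) exactly on the processed urls
theorem get?_dict_loop {α : Type} (f : α → String) (l : List α) (d : PySem.Dict String String) (k : String) :
    (l.foldl (fun d r => let u := f r; if u ≠ "" then d.insert u (titleFromURL u) else d) d).get? k
      = if k ∈ (l.map f).filter (fun u => u ≠ "") then some (titleFromURL k) else d.get? k := by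
  show (l.foldl (stepA f) d).get? k = _
  induction l generalizing d with
  | nil => simp
  | cons r t ih =>
    rw [List.foldl_cons]
    by_cases hu : f r = ""
    · have hstep : stepA f d r = d := by simp [stepA, hu]
      rw [hstep, ih]
      simp [hu]
    · have hstep : stepA f d r = d.insert (f r) (titleFromURL (f r)) := by simp [stepA, hu]
      rw [hstep, ih]
      by_cases hk : k ∈ (t.map f).filter (fun u => u ≠ "")
      · simp only [List.mem_filter, List.mem_map, decide_eq_true_eq] at hk
        simp [hk.1, hk.2]
      · simp only [List.mem_filter, List.mem_map, decide_eq_true_eq, not_and, not_not] at hk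
        by_cases hke : k = f r
        · subst hke
          simp [hu, PySem.Dict.get?_insert_self]
        · simp [PySem.Dict.get?_insert, hke, hu]

theorem nodup_keys_dict_loop {α : Type} (f : α → String) (l : List α) (d : PySem.Dict String String)
    (h : d.keys.Nodup) :
    (l.foldl (fun d r => let u := f r; if u ≠ "" then d.insert u (titleFromURL u) else d) d).keys.Nodup := by
  show (l.foldl (stepA f) d).keys.Nodup
  induction l generalizing d with
  | nil => exact h
  | cons r t ih =>
    rw [List.foldl_cons]
    by_cases hu : f r = ""
    · have hstep : stepA f d r = d := by simp [stepA, hu]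
      rw [hstep]; exact ih _ h
    · have hstep : stepA f d r = d.insert (f r) (titleFromURL (f r)) := by simp [stepA, hu]
      rw [hstep]; exact ih _ (PySem.Dict.nodup_keys_insert _ _ _ h)

-- ---- B's walk, characterized ----

def dedupWalk (prev : Option String) : List String → List String
  | [] => []
  | u :: t => if some u ≠ prev then u :: dedupWalk (some u) t else dedupWalk prev t

-- the body of B's emit loop, as a named function (definitionally equal to the port's lambda)
def stepB (st : Option String × List (List (String × String))) (u : String) :
    Option String × List (List (String × String)) :=
  if some u ≠ st.1 then (some u, st.2 ++ [rowB u]) else st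

theorem foldl_walk_eq (l : List String) (prev : Option String) (acc : List (List (String × String))) :
    (l.foldl (fun st u => if some u ≠ st.1 then (some u, st.2 ++ [rowB u]) else st) (prev, acc)).2
      = acc ++ (dedupWalk prev l).map rowB := by
  show (l.foldl stepB (prev, acc)).2 = _
  induction l generalizing prev acc with
  | nil => simp [dedupWalk]
  | cons u t ih =>
    rw [List.foldl_cons]
    by_cases h : some u = prev
    · have hstep : stepB (prev, acc) u = (prev, acc) := by simp [stepB, h]
      rw [hstep, ih, dedupWalk, if_neg (by simp [h])]
    · have hstep : stepB (prev, acc) u = (some u, acc ++ [rowB u]) := by simp [stepB, h]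
      rw [hstep, ih, dedupWalk, if_pos (by simp [h])]
      simp

theorem mem_of_mem_dedupWalk {x : String} {prev : Option String} {l : List String}
    (h : x ∈ dedupWalk prev l) : x ∈ l := by
  induction l generalizing prev with
  | nil => simp [dedupWalk] at h
  | cons u t ih =>
    rw [dedupWalk] at h
    by_cases hu : some u = prev
    · simp only [hu, ne_eq, not_true_eq_false, if_false] at h
      exact List.mem_cons_of_mem _ (ih h)
    · rw [if_pos (by simp [hu] : some u ≠ prev)] at h
      rcases List.mem_cons.mp h with h1 | h2
      · exact h1 ▸ List.mem_cons_self
      · exact List.mem_cons_of_mem _ (ih h2)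

theorem mem_dedupWalk_of_mem {x : String} {prev : Option String} {l : List String}
    (h : x ∈ l) : x ∈ dedupWalk prev l ∨ prev = some x := by
  induction l generalizing prev with
  | nil => simp at h
  | cons u t ih =>
    rw [dedupWalk]
    by_cases hu : some u = prev
    · rw [if_neg (by simp [hu])]
      rcases List.mem_cons.mp h with h1 | h2
      · right; rw [← hu, h1]
      · exact ih h2
    · rw [if_pos (by simp [hu])]
      rcases List.mem_cons.mp h with h1 | h2
      · left; exact h1 ▸ List.mem_cons_self
      · rcases ih (prev := some u) h2 with h3 | h3
        · left; exact List.mem_cons_of_mem _ h3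
        · left; rw [Option.some_inj] at h3; exact h3 ▸ List.mem_cons_self

theorem dedupWalk_pairwise (l : List String) (hl : l.Pairwise (· ≤ ·)) (prev : Option String)
    (hprev : ∀ x ∈ l, ∀ p, prev = some p → p ≤ x) :
    (dedupWalk prev l).Pairwise (· < ·) ∧ ∀ x ∈ dedupWalk prev l, ∀ p, prev = some p → p < x := by
  induction l generalizing prev with
  | nil => simp [dedupWalk]
  | cons u t ih =>
    rw [List.pairwise_cons] at hl
    rw [dedupWalk]
    by_cases hu : some u = prev
    · rw [if_neg (by simp [hu])]
      exact ih hl.2 prev (fun x hx p hp => hprev x (List.mem_cons_of_mem _ hx) p hp)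
    · rw [if_pos (by simp [hu])]
      have ht := ih hl.2 (some u) (fun x hx p hp => by
        rw [Option.some_inj] at hp; exact hp ▸ hl.1 x hx)
      constructor
      · rw [List.pairwise_cons]
        exact ⟨fun x hx => ht.2 x hx u rfl, ht.1⟩
      · intro x hx p hp
        have hpu : p < u := by
          have h1 : p ≤ u := hprev u List.mem_cons_self p hp
          have h2 : u ≠ p := fun he => hu (by rw [hp, he])
          exact lt_of_le_of_ne h1 (Ne.symm h2)
        rcases List.mem_cons.mp hx with h1 | h2
        · exact h1 ▸ hpu
        · exact lt_trans hpu (ht.2 x h2 u rfl)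

-- ---- putting the two characterizations together ----

theorem rows_eq (d : PySem.Dict String String) (us : List String)
    (hnodup : d.keys.Nodup)
    (hget : ∀ k, d.get? k = if k ∈ us then some (titleFromURL k) else none) :
    (PySem.List.sorted d.keys (fun x => x) false).map (fun u => rowA d u)
      = ((PySem.List.sorted us (fun x => x) false).foldl
          (fun st u => if some u ≠ st.1 then (some u, st.2 ++ [rowB u]) else st)
          ((none : Option String), ([] : List (List (String × String))))).2 := by
  have hmem : ∀ k, k ∈ d.keys ↔ k ∈ us := by
    intro k
    constructor
    · intro h
      by_contra hk
      exact (PySem.Dict.get?_eq_none_iff_not_mem_keys d k).mp (by rw [hget k, if_neg hk]) h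
    · intro h
      by_contra hk
      have hn := (PySem.Dict.get?_eq_none_iff_not_mem_keys d k).mpr hk
      rw [hget k, if_pos h] at hn
      exact Option.some_ne_none _ hn
  rw [foldl_walk_eq]
  have hyspair : (dedupWalk none (PySem.List.sorted us (fun x => x) false)).Pairwise (· < ·) :=
    (dedupWalk_pairwise _ (by simpa using PySem.List.sorted_pairwise us (fun x => x)) none
      (by intro x _ p hp; cases hp)).1
  have hysmem : ∀ x, x ∈ dedupWalk none (PySem.List.sorted us (fun x => x) false) ↔ x ∈ us := by
    intro x
    constructor
    · intro h
      exact (PySem.List.mem_sorted us (fun x => x) false x).mp (mem_of_mem_dedupWalk h)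
    · intro h
      rcases mem_dedupWalk_of_mem ((PySem.List.mem_sorted us (fun x => x) false x).mpr h) with h1 | h1
      · exact h1
      · cases h1
  have hysnodup : (dedupWalk none (PySem.List.sorted us (fun x => x) false)).Nodup :=
    hyspair.imp (fun h => ne_of_lt h)
  have hsorteq : PySem.List.sorted d.keys (fun x => x) false
      = dedupWalk none (PySem.List.sorted us (fun x => x) false) := by
    apply PySem.List.sorted_eq_of_perm_of_pairwise_lt
    · exact (List.perm_ext_iff_of_nodup hysnodup hnodup).mpr
        (fun a => (hysmem a).trans (hmem a).symm)
    · simpa using hyspair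
  rw [hsorteq, List.nil_append]
  apply List.map_congr_left
  intro u hu
  have humem : u ∈ us := (hysmem u).mp hu
  have hsome : d.get? u = some (titleFromURL u) := by rw [hget u, if_pos humem]
  have hget' : d.getD u "" = titleFromURL u := by
    rw [PySem.Dict.getD_eq_get?_getD, hsome, Option.getD_some]
  simp [rowA, rowB, hget']

-- ===== VERDICT (by name: the statement is the Claim_ definition above) =====
theorem build_content_rows_py_spec : Claim_equal_build_content_rows_py := by
  intro monday q1 _
  unfold Spec_build_content_rows_py build_content_rows_py build_content_rows_py_alt
  apply rows_eq
  · exact nodup_keys_dict_loop _ _ _ (nodup_keys_dict_loop _ _ _ (by simp))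
  · intro k
    rw [get?_dict_loop, get?_dict_loop]
    simp only [PySem.Dict.get?_empty, List.filter_append, List.mem_append]
    split_ifs <;> tauto
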